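-- pv_equiv track=rewrite | github.com/Takshak1/database_assignment2 | mongo_strategy_engine.py | _resolve_container
-- ===== SOURCE A (Python) =====
-- from typing import Any, Dict, List, Optional
--
-- def _resolve_container(mapping: Dict[Optional[str], str], parent_path: Optional[str]) -> str:
--     if parent_path in mapping:
--         return mapping[parent_path]
--     if not parent_path:
--         return mapping.get(None)
--     segments = parent_path.split(".")
--     while segments:
--         candidate = ".".join(segments)
--         if candidate in mapping:
--             return mapping[candidate]
--         segments.pop()
--     return mapping.get(None)
-- ===== SOURCE B (Python) =====
-- def _resolve_container(mapping, parent_path):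
--     if parent_path in mapping:
--         return mapping[parent_path]
--     if not parent_path:
--         return mapping.get(None)
--     best = None
--     for k in mapping:
--         if k is None:
--             continue
--         if parent_path == k or parent_path.startswith(k + "."):
--             if best is None or len(k) > len(best):
--                 best = k
--     if best is not None:
--         return mapping[best]
--     return mapping.get(None)
-- ===== Notes on version B (the rewrite author's own statement) =====
-- stated objective: alternative
-- what changed: Instead of generating successively shorter dotted prefixes of parent_path (split, join, pop in a loop) and probing the mapping for each, B makes a single pass over the mapping's keys, keeping the longest key that matches parent_path exactly or at a '.' boundary, then looks it up.
import Mathlib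
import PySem

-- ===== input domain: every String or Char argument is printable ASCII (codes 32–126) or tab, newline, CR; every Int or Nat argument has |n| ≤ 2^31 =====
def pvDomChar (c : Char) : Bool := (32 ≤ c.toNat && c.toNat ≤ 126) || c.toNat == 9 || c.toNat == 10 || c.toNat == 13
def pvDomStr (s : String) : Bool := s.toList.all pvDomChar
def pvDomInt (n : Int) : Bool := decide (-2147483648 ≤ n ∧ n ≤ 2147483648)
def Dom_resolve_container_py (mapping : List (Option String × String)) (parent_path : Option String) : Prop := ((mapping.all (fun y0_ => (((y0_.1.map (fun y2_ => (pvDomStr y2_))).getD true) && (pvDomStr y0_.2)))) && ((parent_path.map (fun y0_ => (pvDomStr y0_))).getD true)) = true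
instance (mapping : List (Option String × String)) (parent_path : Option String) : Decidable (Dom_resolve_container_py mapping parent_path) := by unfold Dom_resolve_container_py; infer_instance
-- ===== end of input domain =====

-- ===== PORT A =====
-- B resolves the container by a single scan over the keys for the longest dotted-prefix match,
-- instead of A's generate-and-test over successively shorter dotted prefixes (alternative decomposition).
-- while segments: candidate = ".".join(segments); if candidate in mapping: return it; segments.pop()
def resolveLoopA (d : PySem.Dict (Option String) String) (segments : List (List Char)) : Option String :=
  if hne : segments = [] then d.get? none
  else
    let candidate := PySem.Chars.join ['.'] segments
    match d.get? (some (String.ofList candidate)) with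
    | some v => some v
    | none => resolveLoopA d segments.dropLast
termination_by segments.length
decreasing_by
  rw [List.length_dropLast]
  exact Nat.sub_lt (List.length_pos_of_ne_nil hne) Nat.one_pos

def resolve_container_py (mapping : List (Option String × String)) (parent_path : Option String) : Option String :=
  let d : PySem.Dict (Option String) String := ⟨mapping⟩
  match d.get? parent_path with
  | some v => some v                                   -- if parent_path in mapping: return mapping[parent_path]
  | none =>
    match parent_path with
    | none => d.get? none                              -- if not parent_path: return mapping.get(None)
    | some s =>
      if s = "" then d.get? none
      else resolveLoopA d (PySem.Chars.splitOn s.toList ['.'])   -- segments = parent_path.split(".")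

-- ===== PORT B =====
-- loop body: skip None keys; on a boundary match keep the longer key
def bstep (s : String) (best : Option String) (kv : Option String × String) : Option String :=
  match kv.1 with
  | none => best
  | some k =>
    if s == k || PySem.Str.startswith s (k ++ ".") then
      match best with
      | none => some k
      | some b => if PySem.Str.len b < PySem.Str.len k then some k else best
    else best

def resolve_container_py_alt (mapping : List (Option String × String)) (parent_path : Option String) : Option String :=
  let d : PySem.Dict (Option String) String := ⟨mapping⟩
  match d.get? parent_path with
  | some v => some v                                   -- if parent_path in mapping: return mapping[parent_path]
  | none =>
    match parent_path with
    | none => d.get? none                              -- if not parent_path: return mapping.get(None)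
    | some s =>
      if s = "" then d.get? none
      else
        match mapping.foldl (bstep s) none with        -- for k in mapping: track longest boundary match
        | some b => d.get? (some b)
        | none => d.get? none

-- ===== PRECONDITION & SPEC =====
def Spec_resolve_container_py (mapping : List (Option String × String)) (parent_path : Option String) (out : Option String) : Prop := out = resolve_container_py_alt mapping parent_path
instance (mapping : List (Option String × String)) (parent_path : Option String) (out : Option String) : Decidable (Spec_resolve_container_py mapping parent_path out) := by unfold Spec_resolve_container_py; infer_instance

-- ===== CLAIM (what is proved, stated in full; the proofs are below) =====
def Claim_equal_resolve_container_py : Prop := ∀ (mapping : List (Option String × String)) (parent_path : Option String), Dom_resolve_container_py mapping parent_path → Spec_resolve_container_py mapping parent_path (resolve_container_py mapping parent_path)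

-- ===== LEMMAS AND PROOFS =====

def splitOne : List Char → List (List Char)
  | [] => [[]]
  | c :: rest => if c = '.' then [] :: splitOne rest
      else match splitOne rest with
        | [] => [[c]]
        | s :: ss => (c :: s) :: ss

theorem splitOne_ne_nil (cs : List Char) : splitOne cs ≠ [] := by
  match cs with
  | [] => simp [splitOne]
  | c :: rest =>
    simp only [splitOne]
    split
    · simp
    · split <;> simp

def consHead (p : List Char) : List (List Char) → List (List Char)
  | [] => [p]
  | s :: ss => (p ++ s) :: ss

theorem consHead_nil {ll : List (List Char)} (h : ll ≠ []) : consHead [] ll = ll := by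
  match ll with
  | [] => exact absurd rfl h
  | s :: ss => simp [consHead]

theorem go_eq' : ∀ (fuel : Nat) (l cur : List Char) (acc : List (List Char)), l.length ≤ fuel →
    PySem.Chars.splitOn.go ['.'] fuel l cur acc = acc.reverse ++ consHead cur.reverse (splitOne l) := by
  intro fuel
  induction fuel with
  | zero =>
    intro l cur acc h
    have : l = [] := List.eq_nil_of_length_eq_zero (Nat.le_zero.mp h)
    subst this
    simp [PySem.Chars.splitOn.go, splitOne, consHead]
  | succ f ih =>
    intro l cur acc h
    match l with
    | [] => simp [PySem.Chars.splitOn.go, splitOne, consHead]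
    | c :: rest =>
      rw [PySem.Chars.splitOn.go]
      by_cases hc : c = '.'
      · subst hc
        have hpre : List.isPrefixOf ['.'] ('.' :: rest) = true := by simp [List.isPrefixOf]
        simp only [hpre, if_pos]
        rw [ih _ _ _ (by simpa using Nat.le_of_succ_le_succ h)]
        simp only [splitOne, if_pos rfl, consHead, List.reverse_cons, List.append_assoc,
          List.cons_append, List.nil_append]
        match hsp : splitOne rest with
        | [] => exact absurd hsp (splitOne_ne_nil rest)
        | s :: ss => simp [consHead]
      · have hpre : List.isPrefixOf ['.'] (c :: rest) = false := by
          simp [List.isPrefixOf]; exact fun hh => absurd hh.symm hc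
        simp only [hpre, if_neg, Bool.false_eq_true, not_false_iff]
        rw [ih _ _ _ (by simpa using Nat.le_of_succ_le_succ h)]
        have hne := splitOne_ne_nil rest
        match hsp : splitOne rest with
        | [] => exact absurd hsp hne
        | s :: ss => simp [splitOne, hc, hsp, consHead]

theorem splitOn_eq (cs : List Char) : PySem.Chars.splitOn cs ['.'] = splitOne cs := by
  rw [PySem.Chars.splitOn, go_eq' _ _ _ _ (Nat.le_succ _)]
  simp [consHead_nil (splitOne_ne_nil cs)]

theorem join_cons_head (sep : List Char) (c : Char) (s : List Char) (ss : List (List Char)) :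
    PySem.Chars.join sep ((c :: s) :: ss) = c :: PySem.Chars.join sep (s :: ss) := by
  match ss with
  | [] => simp [PySem.Chars.join_singleton]
  | t :: ts => simp [PySem.Chars.join_cons_cons]

theorem join_splitOne (cs : List Char) : PySem.Chars.join ['.'] (splitOne cs) = cs := by
  induction cs with
  | nil => simp [splitOne, PySem.Chars.join_singleton]
  | cons c rest ih =>
    by_cases hc : c = '.'
    · subst hc
      simp only [splitOne, if_pos rfl]
      match hsp : splitOne rest with
      | [] => exact absurd hsp (splitOne_ne_nil rest)
      | s :: ss =>
        rw [hsp] at ih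
        simp [PySem.Chars.join_cons_cons, ih]
    · simp only [splitOne, if_neg hc]
      match hsp : splitOne rest with
      | [] => exact absurd hsp (splitOne_ne_nil rest)
      | s :: ss =>
        rw [hsp] at ih
        rw [join_cons_head, ih]

theorem no_dot_splitOne (cs : List Char) : ∀ t ∈ splitOne cs, '.' ∉ t := by
  induction cs with
  | nil => simp [splitOne]
  | cons c rest ih =>
    by_cases hc : c = '.'
    · subst hc
      simp only [splitOne]
      intro t ht
      rcases List.mem_cons.mp ht with h | h
      · simp [h]
      · exact ih t h
    · simp only [splitOne, if_neg hc]
      match hsp : splitOne rest with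
      | [] => exact absurd hsp (splitOne_ne_nil rest)
      | s :: ss =>
        rw [hsp] at ih
        intro t ht
        rcases List.mem_cons.mp ht with h | h
        · subst h
          intro hmem
          rcases List.mem_cons.mp hmem with h' | h'
          · exact hc h'.symm
          · exact ih s (List.mem_cons_self) h'
        · exact ih t (List.mem_cons_of_mem _ h)

theorem join_append (A B : List (List Char)) (hA : A ≠ []) (hB : B ≠ []) :
    PySem.Chars.join ['.'] (A ++ B) = PySem.Chars.join ['.'] A ++ '.' :: PySem.Chars.join ['.'] B := by
  induction A with
  | nil => exact absurd rfl hA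
  | cons a as ih =>
    match as with
    | [] =>
      match B with
      | [] => exact absurd rfl hB
      | b :: bs => simp [PySem.Chars.join_cons_cons, PySem.Chars.join_singleton]
    | a' :: as' =>
      have : (a :: a' :: as') ++ B = a :: ((a' :: as') ++ B) := rfl
      rw [this]
      have h2 : (a' :: as') ++ B = (a' :: (as' ++ B)) := rfl
      rw [h2]
      rw [PySem.Chars.join_cons_cons, PySem.Chars.join_cons_cons, ← h2, ih (by simp)]
      simp

def cands (segs : List (List Char)) : List (List Char) :=
  (List.range segs.length).reverse.map (fun i => PySem.Chars.join ['.'] (segs.take (i+1)))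

theorem mem_cands {segs : List (List Char)} {k : List Char} :
    k ∈ cands segs ↔ ∃ i, i < segs.length ∧ k = PySem.Chars.join ['.'] (segs.take (i+1)) := by
  simp [cands, eq_comm]

theorem len_join_take_lt (segs : List (List Char)) {i j : Nat} (hij : i < j) (hj : j < segs.length) :
    (PySem.Chars.join ['.'] (segs.take (i+1))).length < (PySem.Chars.join ['.'] (segs.take (j+1))).length := by
  have htt : (segs.take (j+1)).take (i+1) = segs.take (i+1) := by
    rw [List.take_take]
    congr 1
    omega
  have hA : segs.take (j+1) = segs.take (i+1) ++ (segs.take (j+1)).drop (i+1) := by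
    conv_lhs => rw [← List.take_append_drop (i+1) (segs.take (j+1))]
    rw [htt]
  have hlen : (segs.take (j+1)).length = j+1 := by
    rw [List.length_take]
    omega
  have hAne : segs.take (i+1) ≠ [] := by
    apply List.ne_nil_of_length_pos
    rw [List.length_take]
    omega
  have hBne : (segs.take (j+1)).drop (i+1) ≠ [] := by
    apply List.ne_nil_of_length_pos
    rw [List.length_drop, hlen]
    omega
  calc (PySem.Chars.join ['.'] (segs.take (i+1))).length
      < (PySem.Chars.join ['.'] (segs.take (i+1)) ++ '.' :: PySem.Chars.join ['.'] ((segs.take (j+1)).drop (i+1))).length := by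
        simp
    _ = (PySem.Chars.join ['.'] (segs.take (j+1))).length := by
        rw [← join_append _ _ hAne hBne, ← hA]

theorem cands_cons {segs : List (List Char)} (hne : segs ≠ []) :
    cands segs = PySem.Chars.join ['.'] segs :: cands segs.dropLast := by
  obtain ⟨m, hm⟩ : ∃ m, segs.length = m + 1 := by
    cases hlen : segs.length with
    | zero => exact absurd (List.eq_nil_of_length_eq_zero hlen) hne
    | succ m => exact ⟨m, rfl⟩
  unfold cands
  rw [hm, List.range_succ, List.reverse_append, List.length_dropLast, hm]
  simp only [List.reverse_singleton, List.singleton_append, List.map_cons, Nat.add_sub_cancel]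
  congr 1
  · rw [List.take_of_length_le (by omega)]
  · apply List.map_congr_left
    intro i hi
    have hi' : i < m := by
      simp at hi
      exact hi
    rw [List.dropLast_eq_take, hm, Nat.add_sub_cancel, List.take_take]
    have : min (i+1) m = i+1 := by omega
    rw [this]

theorem pairwise_cands (segs : List (List Char)) :
    (cands segs).Pairwise (fun x y => y.length < x.length) := by
  unfold cands
  rw [List.pairwise_map, List.pairwise_reverse]
  rw [List.pairwise_iff_getElem]
  intro i j hi hj hij
  simp only [List.length_range] at hi hj
  simp only [List.getElem_range]
  exact len_join_take_lt segs hij hj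

theorem prefix_eq_of_length_eq {k t : List Char} (h : k ++ ['.'] <+: t ++ ['.'])
    (hlen : k.length = t.length) : k = t := by
  have : k ++ ['.'] = t ++ ['.'] := h.eq_of_length (by simp [hlen])
  exact List.append_cancel_right this

theorem pred_to_take : ∀ (segs : List (List Char)), segs ≠ [] → (∀ t ∈ segs, '.' ∉ t) →
    ∀ (k : List Char), k ++ ['.'] <+: PySem.Chars.join ['.'] segs →
    ∃ i, i < segs.length ∧ k = PySem.Chars.join ['.'] (segs.take (i+1)) := by
  intro segs
  induction segs with
  | nil => intro h; exact absurd rfl h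
  | cons t rest ih =>
    intro _ hnd k h
    match rest with
    | [] =>
      rw [PySem.Chars.join_singleton] at h
      exfalso
      exact hnd t List.mem_cons_self (h.subset (by simp))
    | r :: rs =>
      rw [PySem.Chars.join_cons_cons] at h
      -- join = (t ++ ['.']) ++ join (r :: rs)
      have h' : k ++ ['.'] <+: (t ++ ['.']) ++ PySem.Chars.join ['.'] (r :: rs) := by
        simpa [List.append_assoc] using h
      have h2 : t ++ ['.'] <+: (t ++ ['.']) ++ PySem.Chars.join ['.'] (r :: rs) :=
        List.prefix_append _ _
      rcases List.prefix_or_prefix_of_prefix h' h2 with hp | hp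
      · -- k ++ ['.'] <+: t ++ ['.']
        rcases Nat.lt_or_ge k.length t.length with hl | hl
        · exfalso
          have hkt : k ++ ['.'] <+: t := by
            apply List.prefix_of_prefix_length_le hp (List.prefix_append t ['.'])
            simp
            omega
          exact hnd t List.mem_cons_self (hkt.subset (by simp))
        · have hl' : k.length = t.length := by
            have := hp.length_le
            simp at this
            omega
          refine ⟨0, by simp, ?_⟩
          rw [prefix_eq_of_length_eq hp hl']
          simp [PySem.Chars.join_singleton]
      · -- t ++ ['.'] <+: k ++ ['.']
        rcases Nat.lt_or_ge t.length k.length with hl | hl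
        · -- k = t ++ '.' ++ k₂
          have hk : k <+: (t ++ ['.']) ++ PySem.Chars.join ['.'] (r :: rs) :=
            ((List.prefix_append k ['.']).trans h')
          have htk : t ++ ['.'] <+: k := by
            apply List.prefix_of_prefix_length_le hp (List.prefix_append k ['.'])
            simp
            omega
          obtain ⟨k₂, hk₂⟩ := htk
          have hk₂' : k₂ ++ ['.'] <+: PySem.Chars.join ['.'] (r :: rs) := by
            have : (t ++ ['.']) ++ (k₂ ++ ['.']) <+: (t ++ ['.']) ++ PySem.Chars.join ['.'] (r :: rs) := by
              simpa [← hk₂, List.append_assoc] using h'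
            exact (List.prefix_append_right_inj (t ++ ['.'])).mp this
          obtain ⟨i, hi, hki⟩ := ih (by simp) (fun u hu => hnd u (List.mem_cons_of_mem _ hu)) k₂ hk₂'
          refine ⟨i + 1, by simp at hi ⊢; omega, ?_⟩
          have htake : (t :: r :: rs).take (i + 1 + 1) = t :: ((r :: rs).take (i + 1)) := rfl
          rw [htake]
          have hjoin : PySem.Chars.join ['.'] (t :: (r :: rs).take (i+1)) =
              t ++ '.' :: PySem.Chars.join ['.'] ((r :: rs).take (i+1)) := by
            have := join_append [t] ((r :: rs).take (i+1)) (by simp) (by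
              apply List.ne_nil_of_length_pos
              rw [List.length_take]
              simp)
            simpa [PySem.Chars.join_singleton] using this
          rw [hjoin, ← hki, ← hk₂]
          simp
        · have hl' : k.length = t.length := by
            have := hp.length_le
            simp at this
            omega
          refine ⟨0, by simp, ?_⟩
          have hkt : t = k := prefix_eq_of_length_eq hp hl'.symm
          simp [PySem.Chars.join_singleton]
          exact hkt.symm

def Pred (cs k : List Char) : Prop := k = cs ∨ k ++ ['.'] <+: cs

theorem take_pred (segs : List (List Char)) (i : Nat) (hi : i < segs.length) :
    Pred (PySem.Chars.join ['.'] segs) (PySem.Chars.join ['.'] (segs.take (i+1))) := by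
  rcases Nat.lt_or_ge (i+1) segs.length with hlt | hge
  · right
    have hsplit : segs = segs.take (i+1) ++ segs.drop (i+1) := (List.take_append_drop _ _).symm
    have hAne : segs.take (i+1) ≠ [] := by
      apply List.ne_nil_of_length_pos
      rw [List.length_take]
      omega
    have hBne : segs.drop (i+1) ≠ [] := by
      apply List.ne_nil_of_length_pos
      rw [List.length_drop]
      omega
    conv_rhs => rw [hsplit]
    rw [join_append _ _ hAne hBne]
    exact ⟨PySem.Chars.join ['.'] (segs.drop (i+1)), by simp⟩
  · left
    rw [List.take_of_length_le hge]

theorem pred_iff_mem_cands {segs : List (List Char)} (hne : segs ≠ []) (hnd : ∀ t ∈ segs, '.' ∉ t)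
    (k : List Char) : Pred (PySem.Chars.join ['.'] segs) k ↔ k ∈ cands segs := by
  constructor
  · rintro (h | h)
    · subst h
      rw [mem_cands]
      refine ⟨segs.length - 1, by
        have := List.length_pos_of_ne_nil hne
        omega, ?_⟩
      rw [List.take_of_length_le (by have := List.length_pos_of_ne_nil hne; omega)]
    · obtain ⟨i, hi, hk⟩ := pred_to_take segs hne hnd k h
      rw [mem_cands]
      exact ⟨i, hi, hk⟩
  · intro h
    obtain ⟨i, hi, hk⟩ := mem_cands.mp h
    rw [hk]
    exact take_pred segs i hi

def firstLookup (d : PySem.Dict (Option String) String) : List (List Char) → Option String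
  | [] => d.get? none
  | c :: rest =>
    match d.get? (some (String.ofList c)) with
    | some v => some v
    | none => firstLookup d rest

theorem loopA_eq (d : PySem.Dict (Option String) String) (segs : List (List Char)) :
    resolveLoopA d segs = firstLookup d (cands segs) := by
  induction hn : segs.length using Nat.strong_induction_on generalizing segs with
  | _ n ih =>
    by_cases hne : segs = []
    · subst hne
      rw [resolveLoopA]
      simp [cands, firstLookup]
    · rw [resolveLoopA, cands_cons hne]
      simp only [hne, dite_false]
      rw [firstLookup]
      cases hget : d.get? (some (String.ofList (PySem.Chars.join ['.'] segs))) with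
      | some v => simp
      | none =>
        simp only
        subst hn
        exact ih segs.dropLast.length (by
          rw [List.length_dropLast]
          exact Nat.sub_lt (List.length_pos_of_ne_nil hne) Nat.one_pos) _ rfl

theorem firstLookup_none (d : PySem.Dict (Option String) String) (cl : List (List Char))
    (h : ∀ c ∈ cl, d.get? (some (String.ofList c)) = none) : firstLookup d cl = d.get? none := by
  induction cl with
  | nil => rfl
  | cons c rest ih =>
    rw [firstLookup, h c List.mem_cons_self]
    exact ih (fun c' hc' => h c' (List.mem_cons_of_mem _ hc'))

theorem firstLookup_best (d : PySem.Dict (Option String) String) (cl : List (List Char)) (b : String)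
    (hkey : (d.get? (some b)).isSome)
    (hb : b.toList ∈ cl)
    (hpair : cl.Pairwise (fun x y => y.length < x.length))
    (hmax : ∀ c ∈ cl, (d.get? (some (String.ofList c))).isSome → c.length ≤ b.toList.length) :
    firstLookup d cl = d.get? (some b) := by
  induction cl with
  | nil => exact absurd hb (List.not_mem_nil)
  | cons c rest ih =>
    by_cases hc : c = b.toList
    · subst hc
      rw [firstLookup, String.ofList_toList]
      cases hget : d.get? (some b) with
      | some v => rfl
      | none => rw [hget] at hkey; simp at hkey
    · have hbrest : b.toList ∈ rest := by
        rcases List.mem_cons.mp hb with h | h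
        · exact absurd h.symm hc
        · exact h
      have hlt : b.toList.length < c.length := (List.pairwise_cons.mp hpair).1 _ hbrest
      have hcnone : d.get? (some (String.ofList c)) = none := by
        cases hget : d.get? (some (String.ofList c)) with
        | none => rfl
        | some v =>
          have := hmax c List.mem_cons_self (by rw [hget]; rfl)
          omega
      rw [firstLookup, hcnone]
      exact ih hbrest (List.pairwise_cons.mp hpair).2
        (fun c' hc' hs => hmax c' (List.mem_cons_of_mem _ hc') hs)

theorem dot_toList : (".").toList = ['.'] := by decide

theorem bstep_cond (s k : String) :
    (s == k || PySem.Str.startswith s (k ++ ".")) = true ↔ Pred s.toList k.toList := by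
  rw [Bool.or_eq_true, beq_iff_eq, PySem.Str.startswith_eq, PySem.Chars.startswith_iff,
    String.toList_append, dot_toList, Pred]
  constructor
  · rintro (h | h)
    · left; rw [h]
    · right; exact h
  · rintro (h | h)
    · left; exact String.toList_inj.mp (by rw [h]) |>.symm
    · right; exact h

theorem fold_inv (s : String) (l : List (Option String × String)) : ∀ (acc : Option String),
    (∀ b : String, l.foldl (bstep s) acc = some b →
        ((acc = some b ∨ (some b ∈ l.map Prod.fst ∧ Pred s.toList b.toList))
         ∧ (∀ k : String, some k ∈ l.map Prod.fst → Pred s.toList k.toList →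
              k.toList.length ≤ b.toList.length)
         ∧ (∀ a : String, acc = some a → a.toList.length ≤ b.toList.length)))
    ∧ (l.foldl (bstep s) acc = none →
        (acc = none ∧ ∀ k : String, some k ∈ l.map Prod.fst → ¬ Pred s.toList k.toList)) := by
  induction l with
  | nil =>
    intro acc
    constructor
    · intro b hb
      simp at hb
      exact ⟨Or.inl hb, by simp, fun a ha => by rw [hb] at ha; simp at ha; rw [ha]⟩
    · intro hn
      simp at hn
      exact ⟨hn, by simp⟩
  | cons kv rest ih =>
    obtain ⟨k1, v1⟩ := kv
    intro acc
    have hfold : ((k1, v1) :: rest).foldl (bstep s) acc = rest.foldl (bstep s) (bstep s acc (k1, v1)) := rfl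
    have hmap : ((k1, v1) :: rest).map Prod.fst = k1 :: rest.map Prod.fst := rfl
    match k1 with
    | none =>
      have hstep : bstep s acc (none, v1) = acc := rfl
      rw [hfold, hstep, hmap]
      constructor
      · intro b hb
        obtain ⟨ho, hm, hacc⟩ := (ih acc).1 b hb
        refine ⟨?_, ?_, hacc⟩
        · rcases ho with h | h
          · exact Or.inl h
          · exact Or.inr ⟨List.mem_cons_of_mem _ h.1, h.2⟩
        · intro k hk hp
          rcases List.mem_cons.mp hk with h | h
          · exact absurd h (by simp)
          · exact hm k h hp
      · intro hn
        obtain ⟨h1, h2⟩ := (ih acc).2 hn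
        refine ⟨h1, ?_⟩
        intro k hk
        rcases List.mem_cons.mp hk with h | h
        · exact absurd h (by simp)
        · exact h2 k h
    | some k0 =>
      rw [hfold, hmap]
      by_cases hcond : (s == k0 || PySem.Str.startswith s (k0 ++ ".")) = true
      · have hp0 : Pred s.toList k0.toList := (bstep_cond s k0).mp hcond
        have hstep : ∃ c : String, bstep s acc (some k0, v1) = some c ∧
            k0.toList.length ≤ c.toList.length ∧
            (∀ a, acc = some a → a.toList.length ≤ c.toList.length) ∧
            (c = k0 ∨ acc = some c) := by
          simp only [bstep]
          rw [if_pos hcond]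
          match acc with
          | none => exact ⟨k0, rfl, le_refl _, by simp, Or.inl rfl⟩
          | some a =>
            by_cases hlen : PySem.Str.len a < PySem.Str.len k0
            · refine ⟨k0, by
                show (if PySem.Str.len a < PySem.Str.len k0 then some k0 else some a) = some k0
                rw [if_pos hlen], le_refl _, ?_, Or.inl rfl⟩
              intro a' ha'
              cases ha'
              rw [PySem.Str.len_eq, PySem.Str.len_eq] at hlen
              exact_mod_cast le_of_lt hlen
            · refine ⟨a, by
                show (if PySem.Str.len a < PySem.Str.len k0 then some k0 else some a) = some a
                rw [if_neg hlen], ?_, ?_, Or.inr rfl⟩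
              · rw [PySem.Str.len_eq, PySem.Str.len_eq, not_lt] at hlen
                exact_mod_cast hlen
              · intro a' ha'
                cases ha'
                exact le_refl _
        obtain ⟨c, hc, hck0, hcacc, hcor⟩ := hstep
        rw [hc]
        constructor
        · intro b hb
          obtain ⟨ho, hm, haccb⟩ := (ih (some c)).1 b hb
          have hcb : c.toList.length ≤ b.toList.length := haccb c rfl
          refine ⟨?_, ?_, ?_⟩
          · rcases ho with h | h
            · injection h with h'
              subst h'
              rcases hcor with h' | h'
              · subst h'
                exact Or.inr ⟨List.mem_cons_self, hp0⟩
              · exact Or.inl h'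
            · exact Or.inr ⟨List.mem_cons_of_mem _ h.1, h.2⟩
          · intro k hk hp
            rcases List.mem_cons.mp hk with h | h
            · have : k = k0 := by injection h
              subst this
              omega
            · exact hm k h hp
          · intro a ha
            have := hcacc a ha
            omega
        · intro hn
          obtain ⟨h1, _⟩ := (ih (some c)).2 hn
          exact absurd h1 (by simp)
      · have hstep : bstep s acc (some k0, v1) = acc := by
          simp only [bstep]
          rw [if_neg hcond]
        rw [hstep]
        have hnp0 : ¬ Pred s.toList k0.toList := fun hp => hcond ((bstep_cond s k0).mpr hp)
        constructor
        · intro b hb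
          obtain ⟨ho, hm, hacc⟩ := (ih acc).1 b hb
          refine ⟨?_, ?_, hacc⟩
          · rcases ho with h | h
            · exact Or.inl h
            · exact Or.inr ⟨List.mem_cons_of_mem _ h.1, h.2⟩
          · intro k hk hp
            rcases List.mem_cons.mp hk with h | h
            · have : k = k0 := by injection h
              subst this
              exact absurd hp hnp0
            · exact hm k h hp
        · intro hn
          obtain ⟨h1, h2⟩ := (ih acc).2 hn
          refine ⟨h1, ?_⟩
          intro k hk
          rcases List.mem_cons.mp hk with h | h
          · have : k = k0 := by injection h
            subst this
            exact hnp0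
          · exact h2 k h


theorem main_branch (mapping : List (Option String × String)) (s : String) :
    resolveLoopA ⟨mapping⟩ (PySem.Chars.splitOn s.toList ['.']) =
      match mapping.foldl (bstep s) none with
      | some b => (⟨mapping⟩ : PySem.Dict (Option String) String).get? (some b)
      | none => (⟨mapping⟩ : PySem.Dict (Option String) String).get? none := by
  rw [splitOn_eq, loopA_eq]
  have hne : splitOne s.toList ≠ [] := splitOne_ne_nil _
  have hnd : ∀ t ∈ splitOne s.toList, '.' ∉ t := no_dot_splitOne _
  have hjoin : PySem.Chars.join ['.'] (splitOne s.toList) = s.toList := join_splitOne _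
  have hkeys : (⟨mapping⟩ : PySem.Dict (Option String) String).keys = mapping.map Prod.fst := rfl
  cases hfold : mapping.foldl (bstep s) none with
  | none =>
    obtain ⟨-, hnomatch⟩ := (fold_inv s mapping none).2 hfold
    apply firstLookup_none
    intro c hc
    rw [PySem.Dict.get?_eq_none_iff_not_mem_keys]
    intro hmem
    rw [hkeys] at hmem
    have hpred : Pred s.toList c := by
      have := (pred_iff_mem_cands hne hnd c).mpr hc
      rwa [hjoin] at this
    exact hnomatch (String.ofList c) hmem (by rwa [String.toList_ofList])
  | some b =>
    obtain ⟨ho, hmax, -⟩ := (fold_inv s mapping none).1 b hfold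
    rcases ho with h | h
    · exact absurd h (by simp)
    obtain ⟨hbmem, hbpred⟩ := h
    apply firstLookup_best
    · have : (⟨mapping⟩ : PySem.Dict (Option String) String).contains (some b) = true :=
        (PySem.Dict.contains_iff_mem_keys _ _).mpr (by rwa [hkeys])
      rw [← PySem.Dict.contains_eq_isSome_get?]
      exact this
    · rw [← pred_iff_mem_cands hne hnd, hjoin]
      exact hbpred
    · exact pairwise_cands _
    · intro c hc hsome
      have hpredc : Pred s.toList c := by
        have := (pred_iff_mem_cands hne hnd c).mpr hc
        rwa [hjoin] at this
      have hmemc : some (String.ofList c) ∈ mapping.map Prod.fst := by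
        rw [← hkeys]
        apply (PySem.Dict.contains_iff_mem_keys _ _).mp
        rw [PySem.Dict.contains_eq_isSome_get?]
        exact hsome
      have := hmax (String.ofList c) hmemc (by rwa [String.toList_ofList])
      rwa [String.toList_ofList] at this


theorem ports_agree (mapping : List (Option String × String)) (parent_path : Option String) :
    resolve_container_py mapping parent_path = resolve_container_py_alt mapping parent_path := by
  unfold resolve_container_py resolve_container_py_alt
  simp only
  cases hget : (⟨mapping⟩ : PySem.Dict (Option String) String).get? parent_path with
  | some v => rfl
  | none =>
    simp only
    cases parent_path with
    | none => rfl
    | some s =>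
      by_cases hs : s = ""
      · simp [hs]
      · simp only [if_neg hs]
        exact main_branch mapping s

-- ===== VERDICT (by name: the statement is the Claim_ definition above) =====
theorem resolve_container_py_spec : Claim_equal_resolve_container_py := by
  unfold Claim_equal_resolve_container_py
  intro mapping parent_path _hdom
  unfold Spec_resolve_container_py
  exact ports_agree mapping parent_path
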